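-- pv_equiv track=rewrite | github.com/flying-adventure/baekjoon | 프로그래머스/0/181858. 무작위로 K개의 수 뽑기/무작위로 K개의 수 뽑기.py | solution
-- ===== SOURCE A (Python) =====
-- def solution(arr, k):
--     seen=set()
--     ans=[]
--     for i in arr:
--         if i not in seen:
--             if len(ans)<k:
--                 ans.append(i)
--                 seen.add(i)
--     while len(ans)<k:
--         ans.append(-1)
--     return ans
-- ===== SOURCE B (Python) =====
-- def solution(arr, k):
--     ans = []
--     rest = arr
--     while len(ans) < k and rest:
--         h = rest[0]
--         ans.append(h)
--         rest = [x for x in rest[1:] if x != h]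
--     ans += [-1] * (k - len(ans))
--     return ans
-- ===== Notes on version B (the rewrite author's own statement) =====
-- stated objective: alternative
-- what changed: Replaces A's seen-set with a selection-by-filtering loop: repeatedly take the head of the remainder and filter out all its occurrences, so no membership set exists; padding becomes one replicated append instead of a while loop.
import Mathlib
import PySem

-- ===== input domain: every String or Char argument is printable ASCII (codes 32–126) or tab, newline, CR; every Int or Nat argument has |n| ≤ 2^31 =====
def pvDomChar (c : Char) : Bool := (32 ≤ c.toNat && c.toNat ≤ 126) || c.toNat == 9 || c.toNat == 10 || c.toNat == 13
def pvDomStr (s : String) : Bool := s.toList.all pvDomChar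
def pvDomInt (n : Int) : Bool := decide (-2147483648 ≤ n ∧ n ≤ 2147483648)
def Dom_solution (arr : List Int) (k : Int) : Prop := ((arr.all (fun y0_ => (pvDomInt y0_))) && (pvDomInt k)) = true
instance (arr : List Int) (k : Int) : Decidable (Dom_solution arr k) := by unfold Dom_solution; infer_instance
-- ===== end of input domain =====

-- B replaces A's seen-set collection loop with a selection-by-filtering loop (take the
-- head, filter its occurrences out of the remainder) plus a single replicated pad.


-- ===== PORT A =====
-- the loop body of A's 'for i in arr'
def stepA (k : Int) (st : PySem.Set Int × List Int) (i : Int) : PySem.Set Int × List Int :=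
  if PySem.Set.contains st.1 i then st
  else if (st.2.length : Int) < k then (PySem.Set.add st.1 i, st.2 ++ [i]) else st

-- A's 'while len(ans) < k: ans.append(-1)'
def padLoop (ans : List Int) (k : Int) : List Int :=
  if (ans.length : Int) < k then padLoop (ans ++ [-1]) k else ans
termination_by (k - ans.length).toNat
decreasing_by simp; omega

def solution (arr : List Int) (k : Int) : List Int :=
  padLoop (arr.foldl (stepA k) (PySem.Set.empty, [])).2 k

-- ===== PORT B =====
-- B's 'while len(ans) < k and rest' loop
def loopB (k : Int) (ans rest : List Int) : List Int :=
  match rest with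
  | [] => ans
  | h :: t =>
    if (ans.length : Int) < k then loopB k (ans ++ [h]) (t.filter (· != h)) else ans
termination_by rest.length
decreasing_by simpa using Nat.lt_succ_of_le (List.length_filter_le _ _)

def solution_alt (arr : List Int) (k : Int) : List Int :=
  let res := loopB k [] arr
  res ++ List.replicate (k - (res.length : Int)).toNat (-1)

-- ===== PRECONDITION & SPEC =====
def Spec_solution (arr : List Int) (k : Int) (out : List Int) : Prop := out = solution_alt arr k
instance (arr : List Int) (k : Int) (out : List Int) : Decidable (Spec_solution arr k out) := by unfold Spec_solution; infer_instance

-- ===== CLAIM (what is proved, stated in full; the proofs are below) =====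
def Claim_equal_solution : Prop := ∀ (arr : List Int) (k : Int), Dom_solution arr k → Spec_solution arr k (solution arr k)

-- ===== LEMMAS AND PROOFS =====

-- first-occurrence dedup of arr relative to an already-seen list
def ddni (arr : List Int) (seen : List Int) : List Int :=
  match arr with
  | [] => []
  | i :: r => if i ∈ seen then ddni r seen else i :: ddni r (seen ++ [i])

lemma padLoop_eq (ans : List Int) (k : Int) :
    padLoop ans k = ans ++ List.replicate (k - (ans.length : Int)).toNat (-1) := by
  generalize hn : (k - (ans.length : Int)).toNat = n
  induction n generalizing ans with
  | zero => rw [padLoop, if_neg (by omega)]; simp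
  | succ m ih =>
    rw [padLoop, if_pos (by omega)]
    rw [ih (ans ++ [-1]) (by simp; omega)]
    simp [List.replicate_succ]

lemma loopA_eq (k : Int) (arr : List Int) : ∀ (S : PySem.Set Int) (ans : List Int),
    (∀ x : Int, PySem.Set.contains S x = true ↔ x ∈ ans) →
    ans.length ≤ (max k 0).toNat →
    (arr.foldl (stepA k) (S, ans)).2
      = ans ++ (ddni arr ans).take ((max k 0).toNat - ans.length) := by
  induction arr with
  | nil => intro S ans _ _; simp [ddni]
  | cons i r ih =>
    intro S ans hS hlen
    simp only [List.foldl_cons, stepA, ddni]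
    by_cases hmem : i ∈ ans
    · rw [if_pos ((hS i).mpr hmem), if_pos hmem, ih S ans hS hlen]
    · have hc : ¬ PySem.Set.contains S i = true := fun h => hmem ((hS i).mp h)
      rw [if_neg hc, if_neg hmem]
      have hk : ((max k 0).toNat : Int) = max k 0 := Int.toNat_of_nonneg (le_max_right k 0)
      by_cases hlt : (ans.length : Int) < k
      · rw [if_pos hlt]
        have hinv : ∀ x : Int, (PySem.Set.add S i).contains x = true ↔ x ∈ ans ++ [i] := by
          intro x
          rw [PySem.Set.contains_iff, PySem.Set.mem_add, ← PySem.Set.contains_iff, hS]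
          simp
        rw [ih (S.add i) (ans ++ [i]) hinv (by simp; omega)]
        have h2 : (max k 0).toNat - ans.length = ((max k 0).toNat - (ans ++ [i]).length) + 1 := by
          simp; omega
        rw [h2, List.take_succ_cons]
        simp
      · rw [if_neg hlt]
        have h0 : (max k 0).toNat - ans.length = 0 := by omega
        rw [ih S ans hS hlen, h0]
        simp

-- filtering out an already-seen value does not change the relative dedup
lemma ddni_filter (h : Int) (t : List Int) : ∀ seen : List Int, h ∈ seen →
    ddni (t.filter (· != h)) seen = ddni t seen := by
  induction t with
  | nil => intro seen _; simp
  | cons x r ih =>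
    intro seen hs
    by_cases hx : x = h
    · subst hx
      simp only [List.filter_cons, bne_self_eq_false, Bool.false_eq_true, ddni, if_pos hs]
      simpa using ih seen hs
    · have hb : (x != h) = true := by simpa using hx
      simp only [List.filter_cons, hb, if_pos, ddni]
      by_cases hm : x ∈ seen
      · rw [if_pos hm, if_pos hm, ih seen hs]
      · rw [if_neg hm, if_neg hm, ih (seen ++ [x]) (by simp [hs])]

lemma loopB_eq (k : Int) : ∀ (n : Nat) (rest : List Int), rest.length ≤ n →
    ∀ ans : List Int, (∀ x ∈ ans, x ∉ rest) → ans.length ≤ (max k 0).toNat →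
    loopB k ans rest = ans ++ (ddni rest ans).take ((max k 0).toNat - ans.length) := by
  intro n
  induction n with
  | zero =>
    intro rest hlen ans _ _
    have : rest = [] := List.length_eq_zero_iff.mp (Nat.le_zero.mp hlen)
    subst this; simp [loopB, ddni]
  | succ m ih =>
    intro rest hlen ans hinv hans
    match rest with
    | [] => simp [loopB, ddni]
    | h :: t =>
      have hk : ((max k 0).toNat : Int) = max k 0 := Int.toNat_of_nonneg (le_max_right k 0)
      have hh : h ∉ ans := fun hm => hinv h hm (List.mem_cons_self)
      rw [loopB]
      by_cases hlt : (ans.length : Int) < k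
      · rw [if_pos hlt]
        have hinv' : ∀ x ∈ ans ++ [h], x ∉ t.filter (· != h) := by
          intro x hx hmem
          rcases List.mem_append.mp hx with hx | hx
          · exact hinv x hx (List.mem_cons_of_mem _ (List.mem_of_mem_filter hmem))
          · have : x = h := by simpa using hx
            subst this
            have := List.of_mem_filter hmem
            simp at this
        rw [ih (t.filter (· != h))
            (le_trans (List.length_filter_le _ _) (by simpa using Nat.lt_succ_iff.mp hlen))
            (ans ++ [h]) hinv' (by simp; omega)]
        rw [ddni_filter h t (ans ++ [h]) (by simp)]
        have hd : ddni (h :: t) ans = h :: ddni t (ans ++ [h]) := by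
          rw [ddni, if_neg hh]
        rw [hd]
        have h2 : (max k 0).toNat - ans.length = ((max k 0).toNat - (ans ++ [h]).length) + 1 := by
          simp; omega
        rw [h2, List.take_succ_cons]
        simp
      · rw [if_neg hlt]
        have h0 : (max k 0).toNat - ans.length = 0 := by omega
        rw [h0]
        simp

-- ===== VERDICT (by name: the statement is the Claim_ definition above) =====
theorem solution_spec : Claim_equal_solution := by
  intro arr k _
  unfold Spec_solution solution solution_alt
  rw [loopA_eq k arr PySem.Set.empty []
      (by intro x; rw [PySem.Set.contains_iff]; simp [PySem.Set.empty]) (by simp)]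
  rw [loopB_eq k arr.length arr le_rfl [] (by simp) (by simp)]
  rw [padLoop_eq]
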